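-- pv_equiv track=rewrite | github.com/AdamZhouSE/pythonHomework | Code/CodeRecords/2340/60627/237076.py | f
-- ===== SOURCE A (Python) =====
-- def f(num):
--     inter = f1(num[:])
--     for i in inter:
--         minima = num[i]
--         ind = i
--         left = False
--         right = False
--         for j in range(len(num)):
--             if num[j] > minima and j < ind:
--                 left = True
--             if num[j] > minima and j > ind:
--                 right = True
--         if left and right:
--             return True
--     return False
--
-- def f1(num):
--     l = []
--     while(len(l) <len(num)):
--         ind = num.index(min(num))
--         l.append(ind)
--         num[ind] = 10000
--     return l
-- ===== SOURCE B (Python) =====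
-- def f(num):
--     # one pass with a precomputed suffix-max array and a running prefix max:
--     # True iff some element has a strictly larger element on each side
--     n = len(num)
--     if n < 3:
--         return False
--     suf = [0] * n
--     suf[n - 1] = num[n - 1]
--     for i in range(n - 2, -1, -1):
--         suf[i] = num[i] if num[i] > suf[i + 1] else suf[i + 1]
--     pre = num[0]
--     for i in range(1, n - 1):
--         if pre > num[i] and num[i] < suf[i + 1]:
--             return True
--         if num[i] > pre:
--             pre = num[i]
--     return False
-- ===== Notes on version B (the rewrite author's own statement) =====
-- stated objective: faster
-- what changed: Replaced the selection-sort-style index enumeration (repeated min+index scans with a 10000 sentinel) plus a full rescan per candidate by a suffix-max array and a single forward pass with a running prefix max.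
-- intended difference: On lists where some element has strictly larger elements on both sides but every such element is >= 10000 and is skipped by A's sentinel-corrupted index enumeration (f1 writes the sentinel 10000 into the array, so indices whose value is >= 10000 can be silently dropped), A returns False; B returns True, which is the intended answer to 'is there an element with larger neighbours on both sides'. — e.g. on f([10002, 10001, 10002, 9999]): A returns false, B returns true
import Mathlib
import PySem

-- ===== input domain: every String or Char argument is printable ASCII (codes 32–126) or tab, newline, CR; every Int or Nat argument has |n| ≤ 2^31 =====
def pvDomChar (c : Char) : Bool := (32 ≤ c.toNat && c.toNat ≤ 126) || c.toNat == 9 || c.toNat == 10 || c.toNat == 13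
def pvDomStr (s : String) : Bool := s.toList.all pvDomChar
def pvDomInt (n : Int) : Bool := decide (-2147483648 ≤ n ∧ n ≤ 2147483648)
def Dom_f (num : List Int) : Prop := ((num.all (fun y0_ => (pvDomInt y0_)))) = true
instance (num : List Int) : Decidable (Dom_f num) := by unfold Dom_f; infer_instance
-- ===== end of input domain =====

-- B re-implements the check "some element has a strictly larger element on each side" in one
-- pass (suffix-max array + running prefix max) instead of A's repeated min/index scans; on the
-- exceptional inputs D_f below, A returns the wrong value and B the intended one.

-- ===== PORT A =====
-- helper f1: while len(l) < len(num): ind = num.index(min(num)); l.append(ind); num[ind] = 10000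
-- (f1 receives a copy num[:], so the caller's list is not mutated);
-- the while loop runs exactly len(num) times (l grows by one each iteration), so fuel = num.length
def f1go (arr : List Int) (l : List Int) (fuel : Nat) : List Int :=
  match fuel with
  | 0 => l
  | fuel' + 1 =>
    if l.length < arr.length then
      match PySem.List.min? arr (fun y => y) with
      | none => l       -- unreachable: arr ≠ [] when l.length < arr.length
      | some m =>
        match PySem.List.index? arr m with
        | none => l     -- unreachable: m ∈ arr
        | some ind => f1go (arr.set ind 10000) (l ++ [(ind : Int)]) fuel'
    else l

def f1p (num : List Int) : List Int := f1go num [] num.length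

-- body of the outer for-loop of f: minima = num[i]; ind = i; scan j over range(len(num))
def fCheck (num : List Int) (i : Int) : Bool :=
  match PySem.List.pyGet? num i with
  | none => false       -- unreachable: f1 yields in-range indices
  | some minima =>
    let st := (PySem.List.pyRange 0 (num.length : Int) 1).foldl
      (fun (st : Bool × Bool) j =>
        (st.1 || (decide (PySem.List.pyGetD num j 0 > minima) && decide (j < i)),
         st.2 || (decide (PySem.List.pyGetD num j 0 > minima) && decide (j > i)))) (false, false)
    st.1 && st.2

-- for i in inter: ... if left and right: return True; falling off the loop returns False
def fLoop (num : List Int) : List Int → Bool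
  | [] => false
  | i :: rest => if fCheck num i then true else fLoop num rest

def f (num : List Int) : Bool := fLoop num (f1p num)

-- ===== PORT B =====
-- suffix maxima: sufMax xs = [max xs[0:], max xs[1:], …]  (the backward loop building suf)
def sufMax : List Int → List Int
  | [] => []
  | x :: xs =>
    match sufMax xs with
    | [] => [x]
    | s :: ss => (if x > s then x else s) :: s :: ss

-- forward scan: pre = running max of the elements before x, s = max of the elements after x
def goB (pre : Int) : List Int → List Int → Bool
  | x :: xs, s :: ss =>
    if pre > x && x < s then true
    else goB (if x > pre then x else pre) xs ss
  | _, _ => false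

def f_alt (num : List Int) : Bool :=
  match num with
  | a :: b :: rest => goB a (b :: rest) (sufMax rest)
  | _ => false

-- ===== PRECONDITION & SPEC =====
-- spec-level helper: element i of num has a strictly larger element on each side
def wit (n : List Int) (i : Nat) : Prop :=
  ∃ a ∈ n.take i, ∃ b ∈ n.drop (i + 1), n.getD i 0 < min a b

-- the one index outside {i : num[i] < 10000} that A's enumeration can still visit: the first
-- index with value ≤ 10000, which is the first index of the minimum when all values exceed 10000
def pIdx (n : List Int) : Nat := n.findIdx (fun x => x ≤ max 10000 (n.min?.getD 0))

-- On lists where some element has strictly larger elements on both sides but every such element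
-- is ≥ 10000 and none of the indices A's sentinel-10000-corrupted enumeration visits is such an
-- element, A returns false; B returns true, the intended answer to the question "is there an
-- element with strictly larger elements on both sides".
def D_f (num : List Int) : Prop :=
  (∃ i, wit num i) ∧ (∀ i, wit num i → 10000 ≤ num.getD i 0) ∧ ¬ wit num (pIdx num)

def Spec_f (num : List Int) (out : Bool) : Prop := ¬ D_f num → out = f_alt num

def pvDiffWitness_f : List Int := [10002, 10001, 10002, 9999]
def pvDiffWitnessOut_f : Bool × Bool := (false, true)

-- ===== CLAIM (what is proved, stated in full; the proofs are below) =====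
def Claim_unchanged_f : Prop := ∀ (num : List Int), Dom_f num → Spec_f num (f num)
def Claim_changed_f : Prop := Dom_f (pvDiffWitness_f) ∧ D_f (pvDiffWitness_f) ∧ f (pvDiffWitness_f) = pvDiffWitnessOut_f.1 ∧ f_alt (pvDiffWitness_f) = pvDiffWitnessOut_f.2 ∧ pvDiffWitnessOut_f.1 ≠ pvDiffWitnessOut_f.2
def Claim_exact_f : Prop := ∀ (num : List Int), Dom_f num → D_f num → f num ≠ f_alt num

-- ===== LEMMAS AND PROOFS =====
-- boolean form of wit, used to relate both ports to the same witness notion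
def witB (num : List Int) (i : Nat) : Bool :=
  ((num.take i).any (fun a => num.getD i 0 < a)) && ((num.drop (i + 1)).any (fun a => num.getD i 0 < a))

theorem wit_lt (num : List Int) (i : Nat) (h : wit num i) : i + 1 < num.length := by
  obtain ⟨-, -, b, hb, -⟩ := h
  have hne : num.drop (i + 1) ≠ [] := List.ne_nil_of_mem hb
  by_contra hc
  exact hne (List.drop_eq_nil_of_le (by omega))

theorem wit_iff (num : List Int) (i : Nat) : wit num i ↔ witB num i = true := by
  unfold wit witB
  simp only [Bool.and_eq_true, List.any_eq_true, decide_eq_true_eq]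
  constructor
  · rintro ⟨a, ha, b, hb, hv⟩
    rw [lt_min_iff] at hv
    exact ⟨⟨a, ha, hv.1⟩, ⟨b, hb, hv.2⟩⟩
  · rintro ⟨⟨a, ha, hva⟩, ⟨b, hb, hvb⟩⟩
    exact ⟨a, ha, b, hb, lt_min hva hvb⟩

theorem findIdx_congr_mem {α : Type} (l : List α) (p q : α → Bool) (h : ∀ x ∈ l, p x = q x) :
    l.findIdx p = l.findIdx q := by
  induction l with
  | nil => rfl
  | cons x t ih =>
    rw [List.findIdx_cons, List.findIdx_cons, h x List.mem_cons_self,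
      ih (fun y hy => h y (List.mem_cons_of_mem _ hy))]

theorem pIdx_small (num : List Int) (hA : num.any (fun x => decide (x < 10000)) = true) :
    pIdx num = num.findIdx (fun x => decide (x ≤ 10000)) := by
  obtain ⟨w, hwmem, hw⟩ := List.any_eq_true.1 hA
  obtain ⟨mv, hmv⟩ : ∃ mv, num.min? = some mv := by
    cases hnum : num with
    | nil => rw [hnum] at hwmem; simp at hwmem
    | cons x t => exact ⟨_, rfl⟩
  have hle : mv ≤ w := (List.min?_eq_some_iff.1 hmv).2 w hwmem
  unfold pIdx
  apply findIdx_congr_mem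
  intro x hx
  have hm : max 10000 mv = 10000 := max_eq_left (by simp only [decide_eq_true_eq] at hw; omega)
  simp only [hmv, Option.getD_some, hm]

theorem pIdx_big (num : List Int) (hA : ¬ num.any (fun x => decide (x < 10000)) = true)
    (hn : 0 < num.length) : pIdx num = num.idxOf (num.min?.getD 0) := by
  obtain ⟨mv, hmv⟩ : ∃ mv, num.min? = some mv := by
    cases hnum : num with
    | nil => rw [hnum] at hn; simp at hn
    | cons x t => exact ⟨_, rfl⟩
  have hS : ∀ x ∈ num, 10000 ≤ x := by
    intro x hx
    by_contra hc
    exact hA (List.any_eq_true.2 ⟨x, hx, by simp; omega⟩)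
  have h10 : 10000 ≤ mv := hS _ (List.min?_eq_some_iff.1 hmv).1
  unfold pIdx
  rw [hmv, show num.idxOf ((some mv).getD 0) = num.findIdx (fun x => x == mv) from by simp [List.idxOf]]
  apply findIdx_congr_mem
  intro x hx
  simp only [hmv, Option.getD_some, max_eq_right h10]
  have hxmv : mv ≤ x := (List.min?_eq_some_iff.1 hmv).2 x hx
  by_cases he : x = mv
  · simp [he]
  · simp only [decide_eq_true_eq] at *
    have : ¬ x ≤ mv := fun hc => he (le_antisymm hc hxmv)
    simp [this, he]


theorem sufMax_cons_eq (x : Int) (xs : List Int) (y : Int) (ss : List Int)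
    (h : sufMax xs = y :: ss) : sufMax (x :: xs) = (if x > y then x else y) :: y :: ss := by
  unfold sufMax
  rw [h]

theorem sufMax_cons (x : Int) (xs : List Int) :
    ∃ y, sufMax (x :: xs) = y :: sufMax xs ∧ (∀ b ∈ x :: xs, b ≤ y) ∧ y ∈ x :: xs := by
  induction xs generalizing x with
  | nil => exact ⟨x, by simp [sufMax]⟩
  | cons z t ih =>
    obtain ⟨y, hy, hle, hmem⟩ := ih z
    refine ⟨if x > y then x else y, ?_, ?_, ?_⟩
    · rw [sufMax_cons_eq x (z :: t) y (sufMax t) hy, hy]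
    · intro b hb
      rcases List.mem_cons.1 hb with rfl | hb
      · split <;> omega
      · have := hle b hb; split <;> omega
    · split
      · exact List.mem_cons_self
      · exact List.mem_cons_of_mem _ hmem

theorem goB_spec : ∀ (xs : List Int) (pre : Int),
    goB pre xs (sufMax xs.tail) = true ↔
      ∃ i < xs.length, (xs.getD i 0 < pre ∨ ((xs.take i).any (fun a => xs.getD i 0 < a)) = true) ∧
        ((xs.drop (i+1)).any (fun a => xs.getD i 0 < a)) = true := by
  intro xs
  induction xs with
  | nil => intro pre; simp [goB]
  | cons x xs ih =>
    intro pre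
    cases xs with
    | nil =>
      constructor
      · intro h; simp [sufMax, goB] at h
      · rintro ⟨i, hi, _, h2⟩
        cases i
        · simp at h2
        · simp at hi
    | cons z t =>
      obtain ⟨y, hy, hle, hmem⟩ := sufMax_cons z t
      have hxlt : ∀ v : Int, (v < y ↔ ∃ b ∈ z :: t, v < b) := by
        intro v
        constructor
        · intro h; exact ⟨y, hmem, h⟩
        · rintro ⟨b, hb, hvb⟩; exact lt_of_lt_of_le hvb (hle b hb)
      show goB pre (x :: z :: t) (sufMax (z :: t)) = true ↔ _
      rw [hy]
      show (if pre > x && x < y then true else goB (if x > pre then x else pre) (z :: t) (sufMax t)) = true ↔ _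
      constructor
      · intro h
        split at h
        · rename_i hcond
          simp only [Bool.and_eq_true, decide_eq_true_eq] at hcond
          refine ⟨0, by simp, Or.inl (by simpa using hcond.1), ?_⟩
          simp only [List.drop_succ_cons, List.drop_zero, List.any_eq_true, decide_eq_true_eq]
          have := (hxlt x).1 hcond.2
          simpa using this
        · rcases (ih _).1 h with ⟨i, hi, h1, h2⟩
          refine ⟨i + 1, by simpa using hi, ?_, by simpa using h2⟩
          rcases h1 with h1 | h1
          · by_cases hxp : x > pre
            · rw [if_pos hxp] at h1
              right
              simp only [List.take_succ_cons, List.any_cons, Bool.or_eq_true, decide_eq_true_eq,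
                List.getD_cons_succ]
              exact Or.inl h1
            · rw [if_neg hxp] at h1
              left
              simpa only [List.getD_cons_succ] using h1
          · right
            simp only [List.take_succ_cons, List.any_cons, Bool.or_eq_true, List.getD_cons_succ]
            exact Or.inr h1
      · rintro ⟨i, hi, h1, h2⟩
        cases i with
        | zero =>
          simp only [List.getD_cons_zero, List.take_zero, List.any_nil, Bool.false_eq_true, or_false] at h1
          have h2' : ∃ b ∈ z :: t, x < b := by
            simpa [List.any_eq_true] using h2
          have : (decide (pre > x) && decide (x < y)) = true := by
            simp only [Bool.and_eq_true, decide_eq_true_eq]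
            exact ⟨h1, (hxlt x).2 h2'⟩
          rw [this]; simp
        | succ i =>
          split
          · rfl
          · refine (ih _).2 ⟨i, by simpa using hi, ?_, by simpa using h2⟩
            rcases h1 with h1 | h1
            · left; simp only [List.getD_cons_succ] at h1; split <;> omega
            · simp only [List.take_succ_cons, List.any_cons, Bool.or_eq_true, List.getD_cons_succ] at h1
              rcases h1 with h1 | h1
              · left; simp only [decide_eq_true_eq] at h1; split <;> omega
              · right; exact h1

theorem f_alt_spec (num : List Int) :
    f_alt num = true ↔ ∃ i < num.length, witB num i = true := by
  match num with
  | [] => simp [f_alt]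
  | [a] =>
    simp only [f_alt, witB]
    constructor
    · intro h; simp at h
    · rintro ⟨i, hi, h⟩
      cases i
      · simp at h
      · simp at hi
  | a :: b :: rest =>
    show goB a (b :: rest) (sufMax rest) = true ↔ _
    have : sufMax rest = sufMax (b :: rest).tail := rfl
    rw [this, goB_spec]
    constructor
    · rintro ⟨i, hi, h1, h2⟩
      refine ⟨i + 1, by simpa using hi, ?_⟩
      unfold witB
      simp only [List.getD_cons_succ, List.take_succ_cons, List.any_cons, List.drop_succ_cons, Bool.and_eq_true, Bool.or_eq_true]
      refine ⟨?_, h2⟩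
      rcases h1 with h1 | h1
      · left; simpa using h1
      · right; exact h1
    · rintro ⟨i, hi, h⟩
      unfold witB at h
      cases i with
      | zero => simp at h
      | succ i =>
        simp only [List.getD_cons_succ, List.take_succ_cons, List.any_cons, List.drop_succ_cons, Bool.and_eq_true, Bool.or_eq_true] at h
        obtain ⟨h1, h2⟩ := h
        refine ⟨i, by simpa using hi, ?_, h2⟩
        rcases h1 with h1 | h1
        · left; simpa using h1
        · right; exact h1

theorem fCheck_fold (num : List Int) (i minima : Int) :
    ∀ (js : List Int) (st : Bool × Bool),
      js.foldl (fun (st : Bool × Bool) j =>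
        (st.1 || (decide (PySem.List.pyGetD num j 0 > minima) && decide (j < i)),
         st.2 || (decide (PySem.List.pyGetD num j 0 > minima) && decide (j > i)))) st
      = (st.1 || js.any (fun j => decide (PySem.List.pyGetD num j 0 > minima) && decide (j < i)),
         st.2 || js.any (fun j => decide (PySem.List.pyGetD num j 0 > minima) && decide (j > i))) := by
  intro js
  induction js with
  | nil => intro st; simp
  | cons j js ih =>
    intro st
    simp only [List.foldl_cons, List.any_cons, ih]
    simp [Bool.or_assoc]

theorem witB_lt (num : List Int) (i : Nat) (h : witB num i = true) : i + 1 < num.length := by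
  unfold witB at h
  simp only [Bool.and_eq_true, List.any_eq_true] at h
  obtain ⟨-, a, ha, -⟩ := h
  have : num.drop (i+1) ≠ [] := List.ne_nil_of_mem ha
  by_contra hc
  exact this (List.drop_eq_nil_of_le (by omega))

theorem fCheck_eq (num : List Int) (i : Nat) (hi : i < num.length) :
    fCheck num (i : Int) = witB num i := by
  unfold fCheck
  rw [PySem.List.pyGet?_natCast]
  rw [List.getElem?_eq_getElem hi]
  simp only [fCheck_fold, Bool.false_or]
  unfold witB
  congr 1
  · -- left flag: ∃ j < i with num[j] > num[i]
    rw [Bool.eq_iff_iff, List.any_eq_true, List.any_eq_true]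
    constructor
    · rintro ⟨j, hjmem, hj⟩
      rw [PySem.List.mem_pyRange_one] at hjmem
      simp only [Bool.and_eq_true, decide_eq_true_eq] at hj
      obtain ⟨hgt, hlt⟩ := hj
      refine ⟨num.getD j.toNat 0, ?_, ?_⟩
      · have hjn : j.toNat < i := by omega
        have hjn2 : j.toNat < num.length := by omega
        rw [List.getD_eq_getElem _ _ hjn2]
        have : num[j.toNat] = (num.take i)[j.toNat]'(by simp; omega) := (List.getElem_take ..).symm
        rw [this]
        exact List.getElem_mem _
      · simp only [decide_eq_true_eq]
        rw [PySem.List.pyGetD_of_nonneg num 0 (by omega)] at hgt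
        rw [List.getD_eq_getElem _ _ hi]
        exact hgt
    · rintro ⟨a, ha, hlt⟩
      simp only [decide_eq_true_eq] at hlt
      obtain ⟨k, hk, hka⟩ := List.getElem_of_mem ha
      have hki : k < i := by simp at hk; omega
      have hkn : k < num.length := by omega
      refine ⟨(k : Int), ?_, ?_⟩
      · rw [PySem.List.mem_pyRange_one]; omega
      · simp only [Bool.and_eq_true, decide_eq_true_eq]
        constructor
        · rw [PySem.List.pyGetD_of_nonneg num 0 (by omega)]
          simp only [Int.toNat_natCast]
          rw [List.getD_eq_getElem _ _ hkn, List.getD_eq_getElem _ _ hi] at *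
          rw [List.getElem_take] at hka
          rw [hka]
          exact hlt
        · omega
  · -- right flag: ∃ j > i with num[j] > num[i]
    rw [Bool.eq_iff_iff, List.any_eq_true, List.any_eq_true]
    constructor
    · rintro ⟨j, hjmem, hj⟩
      rw [PySem.List.mem_pyRange_one] at hjmem
      simp only [Bool.and_eq_true, decide_eq_true_eq] at hj
      obtain ⟨hgt, hlt⟩ := hj
      have hjn : i + 1 ≤ j.toNat := by omega
      have hjn2 : j.toNat < num.length := by omega
      refine ⟨num.getD j.toNat 0, ?_, ?_⟩
      · rw [List.getD_eq_getElem _ _ hjn2]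
        have : num[j.toNat] = (num.drop (i+1))[j.toNat - (i+1)]'(by simp; omega) := by
          rw [List.getElem_drop]; congr 1; omega
        rw [this]
        exact List.getElem_mem _
      · simp only [decide_eq_true_eq]
        rw [PySem.List.pyGetD_of_nonneg num 0 (by omega)] at hgt
        rw [List.getD_eq_getElem _ _ hi]
        exact hgt
    · rintro ⟨a, ha, hlt⟩
      simp only [decide_eq_true_eq] at hlt
      obtain ⟨k, hk, hka⟩ := List.getElem_of_mem ha
      have hkk : i + 1 + k < num.length := by simp at hk; omega
      refine ⟨((i + 1 + k : Nat) : Int), ?_, ?_⟩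
      · rw [PySem.List.mem_pyRange_one]; omega
      · simp only [Bool.and_eq_true, decide_eq_true_eq]
        constructor
        · rw [PySem.List.pyGetD_of_nonneg num 0 (by omega)]
          simp only [Int.toNat_natCast]
          rw [List.getElem_drop] at hka
          rw [List.getD_eq_getElem _ _ hkk, List.getD_eq_getElem _ _ hi] at *
          rw [hka]
          exact hlt
        · omega

def maskInv (num arr l : List Int) : Prop :=
  arr.length = num.length ∧
  ∀ i : Nat, i < num.length → arr.getD i 0 = if ((i : Int) ∈ l) then 10000 else num.getD i 0

def lInv (num l : List Int) : Prop :=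
  ∀ x ∈ l, ∃ i : Nat, x = (i : Int) ∧ i < num.length ∧ (num.getD i 0 < 10000 ∨ i = pIdx num)

def unvis (num l : List Int) : Finset Nat :=
  (Finset.range num.length).filter (fun i => num.getD i 0 < 10000 ∧ ((i : Int) ∉ l))

theorem unvis_empty_visited {num l : List Int} (hU : unvis num l = ∅) :
    ∀ i : Nat, i < num.length → num.getD i 0 < 10000 → (i : Int) ∈ l := by
  intro i hi hs
  by_contra hc
  have : i ∈ unvis num l := by
    simp [unvis, Finset.mem_filter, Finset.mem_range]
    exact ⟨hi, hs, hc⟩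
  rw [hU] at this
  exact absurd this (Finset.notMem_empty i)

theorem mem_getD {num : List Int} {i : Nat} (hi : i < num.length) : num.getD i 0 ∈ num := by
  rw [List.getD_eq_getElem _ _ hi]; exact List.getElem_mem _

-- when every value < 10000 has been visited, the minimum of the masked array sits first at pIdx
theorem stepB (num arr l : List Int) (hm : maskInv num arr l) (hl : lInv num l)
    (hU : unvis num l = ∅) (hn : 0 < num.length) :
    pIdx num < num.length ∧
    (∀ j, j < num.length → arr.getD (pIdx num) 0 ≤ arr.getD j 0) ∧
    (∀ j, j < pIdx num → arr.getD (pIdx num) 0 < arr.getD j 0) := by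
  obtain ⟨hlen, hmask⟩ := hm
  have hvis := unvis_empty_visited hU
  by_cases hA : num.any (fun x => decide (x < 10000)) = true
  · -- some value < 10000 exists: pIdx = first index with value ≤ 10000
    have hp : pIdx num = num.findIdx (fun x => decide (x ≤ 10000)) := pIdx_small num hA
    obtain ⟨w, hwmem, hw⟩ := List.any_eq_true.1 hA
    have hplen : pIdx num < num.length := by
      rw [hp]
      exact List.findIdx_lt_length_of_exists ⟨w, hwmem, by simp at hw ⊢; omega⟩
    have hple : num.getD (pIdx num) 0 ≤ 10000 := by
      have h2 := List.findIdx_getElem (p := fun x => decide (x ≤ 10000)) (xs := num)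
        (w := hp ▸ hplen)
      simp only [decide_eq_true_eq] at h2
      rw [hp, List.getD_eq_getElem _ _ (hp ▸ hplen)]
      exact h2
    have hjgt : ∀ j, j < pIdx num → 10000 < num.getD j 0 := by
      intro j hj
      have hjlen : j < num.length := by omega
      have := List.not_of_lt_findIdx (p := fun x => decide (x ≤ 10000)) (xs := num)
        (i := j) (by rw [← hp]; exact hj)
      rw [List.getD_eq_getElem _ _ hjlen]
      simp only [decide_eq_false_iff_not, not_le] at this
      simpa using this
    have hge : ∀ j, j < num.length → 10000 ≤ arr.getD j 0 := by
      intro j hj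
      rw [hmask j hj]
      split
      · omega
      · rename_i hjl
        by_contra hc
        exact hjl (hvis j hj (by omega))
    have harrp : arr.getD (pIdx num) 0 = 10000 := by
      rw [hmask _ hplen]
      split
      · rfl
      · rename_i hpl
        have h5 : ¬ num.getD (pIdx num) 0 < 10000 := fun hs => hpl (hvis _ hplen hs)
        omega
    refine ⟨hplen, ?_, ?_⟩
    · intro j hj; rw [harrp]; exact hge j hj
    · intro j hj
      have hjlen : j < num.length := by omega
      rw [harrp, hmask j hjlen]
      have hnj := hjgt j hj
      split
      · rename_i hjl
        obtain ⟨i, hix, hilen, hsm⟩ := hl _ hjl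
        have : i = j := by exact_mod_cast hix.symm
        subst this
        rcases hsm with hsm | hsm
        · omega
        · omega
      · exact hnj
  · -- every value ≥ 10000: pIdx = first index of the minimum
    have hS : ∀ x ∈ num, 10000 ≤ x := by
      intro x hx
      by_contra hc
      exact hA (List.any_eq_true.2 ⟨x, hx, by simp; omega⟩)
    obtain ⟨mv, hmv⟩ : ∃ mv, num.min? = some mv := by
      cases hnum : num with
      | nil => rw [hnum] at hn; simp at hn
      | cons x t => exact ⟨_, rfl⟩
    have hmvmem : mv ∈ num := (List.min?_eq_some_iff.1 hmv).1
    have hmvle : ∀ b ∈ num, mv ≤ b := (List.min?_eq_some_iff.1 hmv).2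
    have hp : pIdx num = num.idxOf mv := by
      rw [pIdx_big num hA hn, hmv]
      rfl
    have hplen : pIdx num < num.length := by
      rw [hp]; exact List.idxOf_lt_length_of_mem hmvmem
    have hpval : num.getD (pIdx num) 0 = mv := by
      rw [hp, List.getD_eq_getElem _ _ (hp ▸ hplen)]
      exact List.getElem_idxOf (hp ▸ hplen)
    have hjne : ∀ j, j < pIdx num → num.getD j 0 ≠ mv := by
      intro j hj
      have hjlen : j < num.length := by omega
      rw [List.getD_eq_getElem _ _ hjlen]
      have := List.not_of_lt_findIdx (p := (fun x => x == mv)) (xs := num) (i := j)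
        (by rw [hp] at hj; simpa [List.idxOf] using hj)
      simpa using this
    have lmem : ∀ x ∈ l, x = ((pIdx num : Nat) : Int) := by
      intro x hx
      obtain ⟨i, hix, hilen, hsm⟩ := hl x hx
      rcases hsm with hsm | hsm
      · exact absurd hsm (by have := hS _ (mem_getD hilen); omega)
      · rw [hix, hsm]
    by_cases hpl : ((pIdx num : Nat) : Int) ∈ l
    · have harrp : arr.getD (pIdx num) 0 = 10000 := by rw [hmask _ hplen, if_pos hpl]
      have harrj : ∀ j, j < num.length → j ≠ pIdx num → arr.getD j 0 = num.getD j 0 := by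
        intro j hj hne
        rw [hmask j hj, if_neg]
        intro hc
        exact hne (by exact_mod_cast lmem _ hc)
      refine ⟨hplen, ?_, ?_⟩
      · intro j hj
        by_cases hje : j = pIdx num
        · rw [hje]
        · rw [harrp, harrj j hj hje]
          exact hS _ (mem_getD hj)
      · intro j hj
        have hjlen : j < num.length := by omega
        rw [harrp, harrj j hjlen (by omega)]
        have h1 : 10000 ≤ num.getD j 0 := hS _ (mem_getD hjlen)
        have h2 : num.getD j 0 ≠ mv := hjne j hj
        have h3 : mv ≤ num.getD j 0 := hmvle _ (mem_getD hjlen)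
        have h4 : 10000 ≤ mv := hS _ hmvmem
        omega
    · have hlempty : ∀ j, j < num.length → arr.getD j 0 = num.getD j 0 := by
        intro j hj
        rw [hmask j hj, if_neg]
        intro hc
        exact hpl (lmem _ hc ▸ hc)
      refine ⟨hplen, ?_, ?_⟩
      · intro j hj
        rw [hlempty _ hplen, hlempty _ hj, hpval]
        exact hmvle _ (mem_getD hj)
      · intro j hj
        have hjlen : j < num.length := by omega
        rw [hlempty _ hplen, hlempty _ hjlen, hpval]
        have := hjne j hj
        have := hmvle _ (mem_getD hjlen)
        omega

theorem stepB' (num arr l : List Int) (hm : maskInv num arr l) (hl : lInv num l)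
    (hU : unvis num l = ∅) (hn : 0 < num.length) :
    ∃ m, PySem.List.min? arr (fun y => y) = some m ∧
      PySem.List.index? arr m = some (pIdx num) := by
  obtain ⟨hplen, hle, hlt⟩ := stepB num arr l hm hl hU hn
  have hlen : arr.length = num.length := hm.1
  have hane : arr ≠ [] := by
    intro hc; rw [hc] at hlen; simp at hlen; omega
  obtain ⟨m, hmin⟩ : ∃ m, PySem.List.min? arr (fun y => y) = some m := by
    cases hmin : PySem.List.min? arr (fun y => y) with
    | none => exact absurd ((PySem.List.min?_eq_none_iff _ _).1 hmin) hane
    | some m => exact ⟨m, rfl⟩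
  have hmmem : m ∈ arr := PySem.List.min?_mem hmin
  have hmle : ∀ y ∈ arr, m ≤ y := PySem.List.min?_isMin hmin
  have hmp : m = arr.getD (pIdx num) 0 := by
    have h1 : m ≤ arr.getD (pIdx num) 0 := hmle _ (mem_getD (by omega))
    obtain ⟨k, hk, hka⟩ := List.getElem_of_mem hmmem
    have h2 : arr.getD (pIdx num) 0 ≤ m := by
      have := hle k (by omega)
      rw [List.getD_eq_getElem _ _ hk, hka] at this
      exact this
    omega
  obtain ⟨k', hik⟩ : ∃ k', PySem.List.index? arr m = some k' := by
    cases hik : PySem.List.index? arr m with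
    | none =>
      have := (PySem.List.index?_isSome_iff arr m).2 hmmem
      rw [hik] at this; simp at this
    | some k' => exact ⟨k', rfl⟩
  obtain ⟨hk'len, hk'val, hk'first⟩ := PySem.List.getElem_of_index?_eq_some hik
  have hkp : k' = pIdx num := by
    rcases lt_trichotomy k' (pIdx num) with h | h | h
    · exfalso
      have := hlt k' h
      rw [List.getD_eq_getElem _ _ hk'len, hk'val, hmp] at this
      omega
    · exact h
    · exfalso
      apply hk'first (pIdx num) h
      rw [← List.getD_eq_getElem arr 0 (show pIdx num < arr.length by omega), ← hmp]
  rw [hkp] at hik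
  exact ⟨m, hmin, hik⟩

theorem stepA (num arr l : List Int) (hm : maskInv num arr l) (hU : unvis num l ≠ ∅)
    {m : Int} {ind : Nat} (hmin : PySem.List.min? arr (fun y => y) = some m)
    (hidx : PySem.List.index? arr m = some ind) :
    ind < num.length ∧ num.getD ind 0 < 10000 ∧ ((ind : Int) ∉ l) := by
  obtain ⟨hlen, hmask⟩ := hm
  obtain ⟨i, hiu⟩ := Finset.nonempty_iff_ne_empty.2 hU
  simp only [unvis, Finset.mem_filter, Finset.mem_range] at hiu
  obtain ⟨hin, hism, hinl⟩ := hiu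
  have harri : arr.getD i 0 = num.getD i 0 := by rw [hmask i hin, if_neg hinl]
  have hmle : m ≤ arr.getD i 0 := PySem.List.min?_isMin hmin _ (mem_getD (by omega))
  have hmlt : m < 10000 := by omega
  obtain ⟨hklen, hkval, -⟩ := PySem.List.getElem_of_index?_eq_some hidx
  have hindn : ind < num.length := by omega
  have harrind : arr.getD ind 0 = m := by rw [List.getD_eq_getElem _ _ hklen]; exact hkval
  have hindnl : ((ind : Int) ∉ l) := by
    intro hc
    have := hmask ind hindn
    rw [if_pos hc] at this
    omega
  have : num.getD ind 0 = m := by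
    have := hmask ind hindn
    rw [if_neg hindnl] at this
    omega
  exact ⟨hindn, by omega, hindnl⟩

theorem maskInv_step (num arr l : List Int) (hm : maskInv num arr l) {ind : Nat}
    (hind : ind < num.length) :
    maskInv num (arr.set ind 10000) (l ++ [(ind : Int)]) := by
  obtain ⟨hlen, hmask⟩ := hm
  refine ⟨by simp [hlen], ?_⟩
  intro i hi
  have hi' : i < arr.length := by omega
  have hset : (arr.set ind 10000).getD i 0 = if ind = i then 10000 else arr.getD i 0 := by
    rw [List.getD_eq_getElem _ _ (by simpa using hi'), List.getElem_set]
    split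
    · rfl
    · rw [List.getD_eq_getElem _ _ hi']
  rw [hset]
  by_cases hie : ind = i
  · subst hie
    simp
  · have hmem : ((i : Int) ∈ l ++ [(ind : Int)]) ↔ ((i : Int) ∈ l) := by
      simp only [List.mem_append, List.mem_singleton]
      constructor
      · rintro (h | h)
        · exact h
        · exfalso; exact hie (by exact_mod_cast h.symm)
      · exact Or.inl
    rw [if_neg hie, hmask i hi]
    by_cases hil : (i : Int) ∈ l
    · rw [if_pos hil, if_pos (hmem.2 hil)]
    · rw [if_neg hil, if_neg (fun hc => hil (hmem.1 hc))]

theorem unvis_step (num l : List Int) (ind : Nat) :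
    unvis num (l ++ [(ind : Int)]) = (unvis num l).erase ind := by
  ext i
  simp only [unvis, Finset.mem_erase, Finset.mem_filter, Finset.mem_range, List.mem_append,
    List.mem_singleton]
  constructor
  · rintro ⟨hi, hs, hn⟩
    push_neg at hn
    exact ⟨fun hc => hn.2 (by exact_mod_cast hc), hi, hs, hn.1⟩
  · rintro ⟨hne, hi, hs, hnl⟩
    refine ⟨hi, hs, ?_⟩
    rintro (h | h)
    · exact hnl h
    · exact hne (by exact_mod_cast h)

theorem lInv_step (num l : List Int) (hl : lInv num l) {ind : Nat} (hind : ind < num.length)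
    (hok : num.getD ind 0 < 10000 ∨ ind = pIdx num) :
    lInv num (l ++ [(ind : Int)]) := by
  intro x hx
  rcases List.mem_append.1 hx with h | h
  · exact hl x h
  · rw [List.mem_singleton] at h
    exact ⟨ind, h, hind, hok⟩

theorem f1go_inv (num : List Int) : ∀ (fuel : Nat) (arr l : List Int),
    maskInv num arr l → lInv num l → (unvis num l).card ≤ fuel →
    l.length + fuel = num.length →
    (∀ x ∈ l, x ∈ f1go arr l fuel) ∧ lInv num (f1go arr l fuel) ∧
      unvis num (f1go arr l fuel) = ∅ ∧
      ((unvis num l).card < fuel → ((pIdx num : Int) ∈ f1go arr l fuel)) := by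
  intro fuel
  induction fuel with
  | zero =>
    intro arr l hm hl hc hlen
    simp only [f1go]
    exact ⟨fun x h => h, hl, Finset.card_eq_zero.1 (Nat.le_zero.1 hc), by omega⟩
  | succ fuel ih =>
    intro arr l hm hl hc hlen
    have hcond : l.length < arr.length := by rw [hm.1]; omega
    have hn : 0 < num.length := by omega
    have hane : arr ≠ [] := by
      intro hcn; rw [hcn] at hcond; simp at hcond
    obtain ⟨m, hmin⟩ : ∃ m, PySem.List.min? arr (fun y => y) = some m := by
      cases hmin : PySem.List.min? arr (fun y => y) with
      | none => exact absurd ((PySem.List.min?_eq_none_iff _ _).1 hmin) hane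
      | some m => exact ⟨m, rfl⟩
    obtain ⟨ind, hidx⟩ : ∃ ind, PySem.List.index? arr m = some ind := by
      cases hidx : PySem.List.index? arr m with
      | none =>
        have := (PySem.List.index?_isSome_iff arr m).2 (PySem.List.min?_mem hmin)
        rw [hidx] at this; simp at this
      | some k => exact ⟨k, rfl⟩
    have hstep : f1go arr l (fuel + 1) = f1go (arr.set ind 10000) (l ++ [(ind : Int)]) fuel := by
      simp only [f1go, hmin, hidx, if_pos hcond]
    rw [hstep]
    by_cases hU : unvis num l = ∅
    · obtain ⟨m', hmin', hidx'⟩ := stepB' num arr l hm hl hU hn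
      have hmm : m' = m := by rw [hmin] at hmin'; exact (Option.some.inj hmin').symm
      subst hmm
      have hindp : ind = pIdx num := by rw [hidx] at hidx'; exact Option.some.inj hidx'
      have hplen : pIdx num < num.length := (stepB num arr l hm hl hU hn).1
      have hind : ind < num.length := hindp ▸ hplen
      obtain ⟨ih1, ih2, ih3, -⟩ := ih (arr.set ind 10000) (l ++ [(ind : Int)])
        (maskInv_step num arr l hm hind) (lInv_step num l hl hind (Or.inr hindp))
        (by rw [unvis_step, hU]; simp) (by simp; omega)
      refine ⟨fun x hx => ih1 x (List.mem_append_left _ hx), ih2, ih3, fun _ => ?_⟩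
      rw [← hindp]
      exact ih1 _ (List.mem_append_right _ (List.mem_singleton.2 rfl))
    · obtain ⟨hind, hsmall, hnotl⟩ := stepA num arr l hm hU hmin hidx
      have hmemu : ind ∈ unvis num l := by
        simp only [unvis, Finset.mem_filter, Finset.mem_range]
        exact ⟨hind, hsmall, hnotl⟩
      have hcard : (unvis num (l ++ [(ind : Int)])).card = (unvis num l).card - 1 := by
        rw [unvis_step, Finset.card_erase_of_mem hmemu]
      have hcpos : 1 ≤ (unvis num l).card := Finset.card_pos.2 ⟨ind, hmemu⟩
      obtain ⟨ih1, ih2, ih3, ih4⟩ := ih (arr.set ind 10000) (l ++ [(ind : Int)])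
        (maskInv_step num arr l hm hind) (lInv_step num l hl hind (Or.inl hsmall))
        (by omega) (by simp; omega)
      refine ⟨fun x hx => ih1 x (List.mem_append_left _ hx), ih2, ih3, fun hlt => ?_⟩
      exact ih4 (by omega)

theorem f1p_spec (num : List Int) :
    lInv num (f1p num) ∧
    (∀ i : Nat, i < num.length → num.getD i 0 < 10000 → ((i : Int) ∈ f1p num)) ∧
    ((∃ i : Nat, i < num.length ∧ ¬ num.getD i 0 < 10000) → ((pIdx num : Int) ∈ f1p num)) := by
  have hsub : unvis num [] ⊆ Finset.range num.length := Finset.filter_subset _ _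
  have hcard : (unvis num []).card ≤ num.length := by
    calc (unvis num []).card ≤ (Finset.range num.length).card := Finset.card_le_card hsub
    _ = num.length := Finset.card_range _
  obtain ⟨-, h2, h3, h4⟩ := f1go_inv num num.length num []
    ⟨rfl, fun i hi => by simp⟩ (fun x hx => absurd hx (List.not_mem_nil)) hcard (by simp)
  refine ⟨h2, fun i hi hs => unvis_empty_visited h3 i hi hs, fun ⟨j, hj, hjs⟩ => ?_⟩
  apply h4
  have hne : j ∉ unvis num [] := by
    simp only [unvis, Finset.mem_filter, Finset.mem_range]
    rintro ⟨-, hc, -⟩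
    exact hjs hc
  have : unvis num [] ⊂ Finset.range num.length :=
    ⟨hsub, fun hsub2 => hne (hsub2 (Finset.mem_range.2 hj))⟩
  calc (unvis num []).card < (Finset.range num.length).card := Finset.card_lt_card this
  _ = num.length := Finset.card_range _

theorem fLoop_any (num : List Int) : ∀ lst, fLoop num lst = lst.any (fCheck num) := by
  intro lst
  induction lst with
  | nil => rfl
  | cons x rest ih =>
    show (if fCheck num x then true else fLoop num rest) = _
    rw [List.any_cons, ih]
    by_cases h : fCheck num x = true
    · rw [if_pos h, h, Bool.true_or]
    · rw [Bool.not_eq_true] at h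
      rw [if_neg (by rw [h]; exact Bool.false_ne_true), h, Bool.false_or]

theorem f_true_iff (num : List Int) :
    f num = true ↔ ∃ x ∈ f1p num, fCheck num x = true := by
  unfold f
  rw [fLoop_any]
  exact List.any_eq_true

theorem f_alt_of_fp (num : List Int) (hA : f num = true) : f_alt num = true := by
  obtain ⟨x, hx, hc⟩ := (f_true_iff num).1 hA
  obtain ⟨i, rfl, hin, -⟩ := (f1p_spec num).1 x hx
  rw [fCheck_eq num i hin] at hc
  exact (f_alt_spec num).2 ⟨i, hin, hc⟩


-- ---- an efficient decision procedure for D_f (used only by its Decidable instance) ----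

-- like goB, but flags a witness whose own value is < 10000
def scanS (pre : Int) : List Int → List Int → Bool
  | x :: xs, s :: ss =>
    (pre > x && x < s && x < 10000) || scanS (if x > pre then x else pre) xs ss
  | _, _ => false

theorem scanS_spec : ∀ (xs : List Int) (pre : Int),
    scanS pre xs (sufMax xs.tail) = true ↔
      ∃ i < xs.length, ((xs.getD i 0 < pre ∨ ((xs.take i).any (fun a => xs.getD i 0 < a)) = true) ∧
        ((xs.drop (i+1)).any (fun a => xs.getD i 0 < a)) = true) ∧ xs.getD i 0 < 10000 := by
  intro xs
  induction xs with
  | nil => intro pre; simp [scanS]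
  | cons x xs ih =>
    intro pre
    cases xs with
    | nil =>
      constructor
      · intro h; simp [sufMax, scanS] at h
      · rintro ⟨i, hi, ⟨-, h2⟩, -⟩
        cases i
        · simp at h2
        · simp at hi
    | cons z t =>
      obtain ⟨y, hy, hle, hmem⟩ := sufMax_cons z t
      have hxlt : ∀ v : Int, (v < y ↔ ∃ b ∈ z :: t, v < b) := by
        intro v
        constructor
        · intro h; exact ⟨y, hmem, h⟩
        · rintro ⟨b, hb, hvb⟩; exact lt_of_lt_of_le hvb (hle b hb)
      show scanS pre (x :: z :: t) (sufMax (z :: t)) = true ↔ _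
      rw [hy]
      show ((decide (pre > x) && decide (x < y) && decide (x < 10000)) ||
        scanS (if x > pre then x else pre) (z :: t) (sufMax t)) = true ↔ _
      rw [Bool.or_eq_true]
      constructor
      · intro h
        rcases h with hcond | h
        · simp only [Bool.and_eq_true, decide_eq_true_eq] at hcond
          obtain ⟨⟨h1, h2⟩, h3⟩ := hcond
          refine ⟨0, by simp, ⟨Or.inl (by simpa using h1), ?_⟩, by simpa using h3⟩
          simp only [List.drop_succ_cons, List.drop_zero, List.any_eq_true, decide_eq_true_eq]
          have := (hxlt x).1 h2
          simpa using this
        · rcases (ih _).1 h with ⟨i, hi, ⟨h1, h2⟩, h3⟩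
          refine ⟨i + 1, by simpa using hi, ⟨?_, by simpa using h2⟩, by simpa using h3⟩
          rcases h1 with h1 | h1
          · by_cases hxp : x > pre
            · rw [if_pos hxp] at h1
              right
              simp only [List.take_succ_cons, List.any_cons, Bool.or_eq_true, decide_eq_true_eq,
                List.getD_cons_succ]
              exact Or.inl h1
            · rw [if_neg hxp] at h1
              left
              simpa only [List.getD_cons_succ] using h1
          · right
            simp only [List.take_succ_cons, List.any_cons, Bool.or_eq_true, List.getD_cons_succ]
            exact Or.inr h1
      · rintro ⟨i, hi, ⟨h1, h2⟩, h3⟩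
        cases i with
        | zero =>
          simp only [List.getD_cons_zero, List.take_zero, List.any_nil, Bool.false_eq_true,
            or_false] at h1
          simp only [List.getD_cons_zero] at h3
          have h2' : ∃ b ∈ z :: t, x < b := by
            simpa [List.any_eq_true] using h2
          left
          simp only [Bool.and_eq_true, decide_eq_true_eq]
          exact ⟨⟨h1, (hxlt x).2 h2'⟩, h3⟩
        | succ i =>
          right
          refine (ih _).2 ⟨i, by simpa using hi, ⟨?_, by simpa using h2⟩, by simpa using h3⟩
          rcases h1 with h1 | h1
          · left; simp only [List.getD_cons_succ] at h1; split <;> omega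
          · simp only [List.take_succ_cons, List.any_cons, Bool.or_eq_true,
              List.getD_cons_succ] at h1
            rcases h1 with h1 | h1
            · left; simp only [decide_eq_true_eq] at h1; split <;> omega
            · right; exact h1

theorem scanS_top (num : List Int) :
    (match num with
      | a :: b :: rest => scanS a (b :: rest) (sufMax rest)
      | _ => false) = true ↔ ∃ i < num.length, witB num i = true ∧ num.getD i 0 < 10000 := by
  match num with
  | [] => simp
  | [a] =>
    constructor
    · intro h; simp at h
    · rintro ⟨i, hi, h, -⟩
      cases i
      · simp [witB] at h
      · simp at hi
  | a :: b :: rest =>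
    show scanS a (b :: rest) (sufMax rest) = true ↔ _
    have heq : sufMax rest = sufMax (b :: rest).tail := rfl
    rw [heq, scanS_spec]
    constructor
    · rintro ⟨i, hi, ⟨h1, h2⟩, h3⟩
      refine ⟨i + 1, by simpa using hi, ?_, by simpa using h3⟩
      unfold witB
      simp only [List.getD_cons_succ, List.take_succ_cons, List.any_cons, List.drop_succ_cons,
        Bool.and_eq_true, Bool.or_eq_true]
      refine ⟨?_, h2⟩
      rcases h1 with h1 | h1
      · left; simpa using h1
      · right; exact h1
    · rintro ⟨i, hi, h, h3⟩
      unfold witB at h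
      cases i with
      | zero => simp at h
      | succ i =>
        simp only [List.getD_cons_succ, List.take_succ_cons, List.any_cons, List.drop_succ_cons,
          Bool.and_eq_true, Bool.or_eq_true] at h
        obtain ⟨h1, h2⟩ := h
        refine ⟨i, by simpa using hi, ⟨?_, h2⟩, by simpa using h3⟩
        rcases h1 with h1 | h1
        · left; simpa using h1
        · right; exact h1

def Dcheck (num : List Int) : Bool :=
  (match num with
    | a :: b :: rest => goB a (b :: rest) (sufMax rest)
    | _ => false) &&
  !(match num with
    | a :: b :: rest => scanS a (b :: rest) (sufMax rest)
    | _ => false) &&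
  !(witB num (pIdx num))

theorem Dcheck_iff (num : List Int) : D_f num ↔ Dcheck num = true := by
  have halt : (match num with
      | a :: b :: rest => goB a (b :: rest) (sufMax rest)
      | _ => false) = f_alt num := by
    unfold f_alt
    rfl
  unfold D_f Dcheck
  rw [halt]
  simp only [Bool.and_eq_true, Bool.not_eq_true']
  constructor
  · rintro ⟨⟨i, hw⟩, h2, h3⟩
    have hi := wit_lt num i hw
    refine ⟨⟨(f_alt_spec num).2 ⟨i, by omega, (wit_iff num i).1 hw⟩, ?_⟩, ?_⟩
    · rw [← Bool.not_eq_true, scanS_top]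
      rintro ⟨j, hjn, hjw, hjs⟩
      have := h2 j ((wit_iff num j).2 hjw)
      omega
    · rw [← Bool.not_eq_true]
      intro hc
      exact h3 ((wit_iff num _).2 hc)
  · rintro ⟨⟨h1, h2⟩, h3⟩
    obtain ⟨i, hin, hw⟩ := (f_alt_spec num).1 h1
    refine ⟨⟨i, (wit_iff num i).2 hw⟩, ?_, ?_⟩
    · intro j hj
      by_contra hs
      rw [← Bool.not_eq_true, scanS_top] at h2
      exact h2 ⟨j, by have := wit_lt num j hj; omega, (wit_iff num j).1 hj, by omega⟩
    · intro hc
      rw [(wit_iff num _).1 hc] at h3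
      simp at h3

instance (num : List Int) : Decidable (D_f num) :=
  decidable_of_iff (Dcheck num = true) (Dcheck_iff num).symm

instance (num : List Int) (out : Bool) : Decidable (Spec_f num out) := by
  unfold Spec_f; infer_instance

-- ===== VERDICT (by name: the statement is the Claim_ definition above) =====
theorem f_spec : Claim_unchanged_f := by
  unfold Claim_unchanged_f
  intro num _dom
  unfold Spec_f
  intro hD
  cases hB : f_alt num with
  | false =>
    by_contra hA
    rw [Bool.not_eq_false] at hA
    rw [f_alt_of_fp num hA] at hB
    simp at hB
  | true =>
    obtain ⟨i, hin, hw⟩ := (f_alt_spec num).1 hB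
    have hP : ∃ k, wit num k := ⟨i, (wit_iff num i).2 hw⟩
    by_cases hQ : ∀ j < num.length, num.getD j 0 < 10000 → witB num j = false
    · -- the third conjunct of D_f must fail: witB num (pIdx num) = true
      have hR : witB num (pIdx num) = true := by
        by_contra hc
        rw [Bool.not_eq_true] at hc
        apply hD
        refine ⟨hP, ?_, fun hwp => by rw [(wit_iff num _).1 hwp] at hc; simp at hc⟩
        intro j hj
        have hjl := wit_lt num j hj
        by_contra hs
        have hf := hQ j (by omega) (by omega)
        rw [(wit_iff num j).1 hj] at hf
        simp at hf
      have hplen : pIdx num < num.length := by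
        have := witB_lt num (pIdx num) hR
        omega
      have hmem : ((pIdx num : Nat) : Int) ∈ f1p num := by
        by_cases hbig : ∃ j : Nat, j < num.length ∧ ¬ num.getD j 0 < 10000
        · exact (f1p_spec num).2.2 hbig
        · push_neg at hbig
          exact (f1p_spec num).2.1 _ hplen (hbig _ hplen)
      exact (f_true_iff num).2 ⟨_, hmem, by rw [fCheck_eq num _ hplen]; exact hR⟩
    · push_neg at hQ
      obtain ⟨j, hjn, hjs, hjw⟩ := hQ
      rw [Ne, Bool.not_eq_false] at hjw
      have hmem : ((j : Nat) : Int) ∈ f1p num := (f1p_spec num).2.1 j hjn hjs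
      exact (f_true_iff num).2 ⟨_, hmem, by rw [fCheck_eq num _ hjn]; exact hjw⟩

theorem f_changed : Claim_changed_f := by unfold Claim_changed_f; decide

theorem f_tight : Claim_exact_f := by
  unfold Claim_exact_f
  intro num _dom hD
  obtain ⟨hP, hQ, hR⟩ := hD
  obtain ⟨i0, hw0⟩ := hP
  have hi0 := wit_lt num i0 hw0
  have hB : f_alt num = true := (f_alt_spec num).2 ⟨i0, by omega, (wit_iff num i0).1 hw0⟩
  have hA : f num = false := by
    by_contra hc
    rw [Bool.not_eq_false] at hc
    obtain ⟨x, hx, hchk⟩ := (f_true_iff num).1 hc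
    obtain ⟨i, rfl, hin, hsm⟩ := (f1p_spec num).1 x hx
    rw [fCheck_eq num i hin] at hchk
    have hwi : wit num i := (wit_iff num i).2 hchk
    rcases hsm with hsm | hsm
    · have := hQ i hwi
      omega
    · rw [hsm] at hwi
      exact hR hwi
  rw [hA, hB]
  exact Bool.false_ne_true
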